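-- pv_equiv track=rewrite | github.com/Prabhat-git-99/SkillEdgeAssesment | 8.py | newString
-- ===== SOURCE A (Python) =====
-- from collections import Counter
--
-- def newString(string):
--
--     # make dictionary of letter to find repetationd
--     dicti = dict(Counter(string))
--     result = ''
--     for i in string:
--         if i in dicti:
--             # if value is greater than 1, append ')' which shows repeatation
--             if dicti[i] > 1:
--                 result += ')'
--             else:
--                 result += '('
--     return result
-- ===== SOURCE B (Python) =====
-- def newString(string):
--     # Sort the characters: duplicates become adjacent, so the set of repeated
--     # characters is exactly the set of equal adjacent pairs of the sorted list.
--     s = sorted(string)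
--     dup = {a for a, b in zip(s, s[1:]) if a == b}
--     return ''.join(')' if c in dup else '(' for c in string)
-- ===== Notes on version B (the rewrite author's own statement) =====
-- stated objective: alternative
-- what changed: Replaces the Counter frequency table and threshold test by a sort-based duplicate detector: sort the characters, collect the set of equal adjacent pairs (the repeated characters), then translate the string by membership in that set - no counts are ever computed.
import Mathlib
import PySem

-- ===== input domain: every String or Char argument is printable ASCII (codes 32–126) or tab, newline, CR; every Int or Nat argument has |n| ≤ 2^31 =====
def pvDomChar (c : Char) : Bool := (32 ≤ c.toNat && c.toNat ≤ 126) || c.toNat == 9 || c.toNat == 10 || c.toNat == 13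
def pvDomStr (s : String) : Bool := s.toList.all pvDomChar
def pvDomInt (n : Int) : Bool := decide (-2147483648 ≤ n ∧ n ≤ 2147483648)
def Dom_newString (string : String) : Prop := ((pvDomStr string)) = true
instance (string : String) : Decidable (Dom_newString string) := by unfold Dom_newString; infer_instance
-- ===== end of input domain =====

-- B replaces A's Counter table + threshold by sort-then-scan: sorted characters,
-- duplicate set = equal adjacent pairs, translation by set membership (alternative algorithm; same return value).
-- ===== PORT A =====
-- counter + dict lookup, as in A
def newString (string : String) : String :=
  let dicti := PySem.Dict.counter string.toList
  string.toList.foldl (fun result i =>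
    if dicti.contains i then
      if dicti.getD i 0 > 1 then result.push ')' else result.push '('
    else result) ""

-- ===== PORT B =====
-- B: s = sorted(string); dup = {a for a,b in zip(s, s[1:]) if a == b};
--    ''.join(')' if c in dup else '(' for c in string).
-- s[1:] on a list is List.drop 1 (exact); the set comprehension is Set.ofList of the generated list.
def newString_alt (string : String) : String :=
  let s := PySem.List.sorted string.toList (fun x => x) false
  let dup : PySem.Set Char :=
    PySem.Set.ofList ((s.zip (s.drop 1)).filterMap (fun p => if p.1 = p.2 then some p.1 else none))
  String.ofList (string.toList.map (fun c => if PySem.Set.contains dup c then ')' else '('))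

-- ===== PRECONDITION & SPEC =====
def Spec_newString (string : String) (out : String) : Prop := out = newString_alt string
instance (string : String) (out : String) : Decidable (Spec_newString string out) := by unfold Spec_newString; infer_instance

-- ===== CLAIM (what is proved, stated in full; the proofs are below) =====
def Claim_equal_newString : Prop := ∀ (string : String), Dom_newString string → Spec_newString string (newString string)

-- ===== LEMMAS AND PROOFS =====

-- In a ≤-sorted list, (x,x) is an adjacent pair iff x occurs at least twice.
lemma adj_pair_iff_two_le_count (t : List Char) (ht : t.Pairwise (· ≤ ·)) (x : Char) :
    (x, x) ∈ t.zip t.tail ↔ 2 ≤ t.count x := by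
  induction t with
  | nil => simp
  | cons a r ih =>
    cases r with
    | nil =>
      simp [List.count_cons]
      split <;> omega
    | cons b r' =>
      have hpair := List.pairwise_cons.mp ht
      have htail : (b :: r').Pairwise (· ≤ ·) := hpair.2
      have hab : a ≤ b := hpair.1 b (by simp)
      have ihs := ih htail
      have hmono : (b :: r').count x ≤ (a :: b :: r').count x := by
        simp [List.count_cons]
      constructor
      · intro h
        simp only [List.tail_cons, List.zip_cons_cons, List.mem_cons] at h
        rcases h with h | h
        · obtain ⟨h1, h2⟩ : x = a ∧ x = b := by simpa [Prod.ext_iff] using h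
          subst h1; subst h2
          simp
        · have h2c := ihs.mp (by simpa using h)
          omega
      · intro h
        by_cases hax : a = x
        · subst hax
          have hmem : a ∈ b :: r' := by
            by_contra hm
            have : (b :: r').count a = 0 := List.count_eq_zero.mpr hm
            simp [this] at h
          have hba : b = a := by
            rcases List.mem_cons.mp hmem with h1 | h1
            · exact h1.symm
            · exact le_antisymm ((List.pairwise_cons.mp htail).1 a h1) hab
          simp [List.tail_cons, List.zip_cons_cons, hba]
        · have h2c : 2 ≤ (b :: r').count x := by
            simp [List.count_cons, hax] at h ⊢; omega
          simp only [List.tail_cons, List.zip_cons_cons, List.mem_cons]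
          right
          simpa using ihs.mpr h2c

-- A's fold produces acc ++ the pointwise translation by count
lemma fold_eq (s : List Char) (dicti : PySem.Dict Char Int)
    (hd : dicti = PySem.Dict.counter s) :
    ∀ (l : List Char) (acc : String), (∀ i ∈ l, i ∈ s) →
    l.foldl (fun result i =>
      if dicti.contains i then
        if dicti.getD i 0 > 1 then result.push ')' else result.push '('
      else result) acc
    = acc ++ String.ofList (l.map (fun c => if 2 ≤ s.count c then ')' else '(')) := by
  intro l
  induction l with
  | nil => intro acc _; apply String.toList_inj.mp; simp
  | cons h t ih =>
    intro acc hmem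
    have hmemh : h ∈ s := hmem h (by simp)
    have hcont : dicti.contains h = true := by
      rw [hd, PySem.Dict.contains_counter]; simpa using hmemh
    have hgetD : dicti.getD h 0 = (s.count h : Int) := by
      rw [hd, PySem.Dict.getD_counter]
    simp only [List.foldl_cons, hcont, if_true, hgetD, List.map_cons]
    rw [ih _ (fun i hi => hmem i (by simp [hi]))]
    apply String.toList_inj.mp
    by_cases h2 : 2 ≤ s.count h
    · have : (1 : Int) < (s.count h : Int) := by exact_mod_cast h2
      simp [h2, this, String.toList_push]
    · have : ¬ (1 : Int) < (s.count h : Int) := by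
        have : s.count h ≤ 1 := by omega
        exact_mod_cast Nat.not_lt.mpr this
      simp [h2, this, String.toList_push]

-- ===== VERDICT (by name: the statement is the Claim_ definition above) =====
theorem newString_spec : Claim_equal_newString := by
  intro string _
  unfold Spec_newString newString newString_alt
  rw [fold_eq string.toList _ rfl string.toList "" (fun i hi => hi)]
  apply String.toList_inj.mp
  simp only [String.toList_append, String.toList_ofList]
  apply List.map_congr_left
  intro c _
  have hpw : (PySem.List.sorted string.toList (fun x => x) false).Pairwise (· ≤ ·) := by
    simpa using PySem.List.sorted_pairwise string.toList (fun x => x)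
  have hperm := PySem.List.sorted_perm string.toList (fun x => x) false
  by_cases h : 2 ≤ string.toList.count c
  · simp [h]
    exact (adj_pair_iff_two_le_count _ hpw c).mpr (by rwa [hperm.count_eq])
  · simp [h]
    intro hc
    exact h (by rw [← hperm.count_eq]; exact (adj_pair_iff_two_le_count _ hpw c).mp hc)
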